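-- pv_equiv track=rewrite | github.com/yejiwon/algorithm | jiwon/기출문제 연습/오늘의집/1.py | solution
-- ===== SOURCE A (Python) =====
-- directions = {
--     'E': 0,
--     'S': 1,
--     'W': 2,
--     'N': 3
-- }
--
-- def solution(path):
--     result = []
--
--     prevTime = 0
--     currDir = path[0]
--     currDis = 0
--     for p in path:
--         if p == currDir:
--             currDis += 1
--         else:
--             turnDir = 'right' if (directions[p] - directions[currDir] == 1 or directions[p] - directions[currDir] == -3) else 'left'
--             if currDis > 5:
--                 result.append(f"Time {prevTime + currDis - 5}: Go straight {500}m and turn {turnDir}")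
--             else:
--                 result.append(f"Time {prevTime}: Go straight {currDis*100}m and turn {turnDir}")
--             prevTime += currDis
--             currDir = p
--             currDis = 1
--
--     return result
-- ===== SOURCE B (Python) =====
-- directions = {
--     'E': 0,
--     'S': 1,
--     'W': 2,
--     'N': 3
-- }
--
-- def solution(path):
--     # run-length encode the path into (direction, length) groups
--     runs = []
--     i, n = 0, len(path)
--     while i < n:
--         j = i
--         while j < n and path[j] == path[i]:
--             j += 1
--         runs.append((path[i], j - i))
--         i = j
--     # one report line per adjacent pair of groups (the last group emits nothing)
--     result = []
--     t = 0
--     for (pd, pl), (cd, _) in zip(runs, runs[1:]):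
--         diff = directions[cd] - directions[pd]
--         turn = 'right' if (diff == 1 or diff == -3) else 'left'
--         if pl > 5:
--             result.append(f"Time {t + pl - 5}: Go straight 500m and turn {turn}")
--         else:
--             result.append(f"Time {t}: Go straight {pl*100}m and turn {turn}")
--         t += pl
--     return result
-- ===== Notes on version B (the rewrite author's own statement) =====
-- stated objective: alternative
-- what changed: B first run-length-encodes the path into (direction, length) groups, then emits one report line per adjacent pair of groups, instead of A's single stateful loop carrying result/prevTime/currDir/currDis.
import Mathlib
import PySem

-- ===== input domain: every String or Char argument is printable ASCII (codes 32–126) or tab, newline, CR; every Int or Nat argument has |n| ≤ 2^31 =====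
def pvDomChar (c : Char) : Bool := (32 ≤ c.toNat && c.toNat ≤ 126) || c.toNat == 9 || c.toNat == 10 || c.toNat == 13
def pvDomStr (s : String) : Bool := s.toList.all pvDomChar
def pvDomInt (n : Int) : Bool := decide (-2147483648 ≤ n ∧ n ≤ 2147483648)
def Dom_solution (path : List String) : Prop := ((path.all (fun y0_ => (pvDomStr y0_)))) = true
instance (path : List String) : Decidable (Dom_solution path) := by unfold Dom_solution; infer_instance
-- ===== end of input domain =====

-- B re-implements A's stateful navigation loop as run-length encoding followed by a pairwise
-- emitter over adjacent groups (objective: alternative decomposition, same cost).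

-- ===== PORT A =====
-- the module-level dict 'directions' (shared context of both programs)
def pyDirections : PySem.Dict String Int :=
  ((((PySem.Dict.empty).insert "E" 0).insert "S" 1).insert "W" 2).insert "N" 3

-- directions[p]; default 0 is only reached on a KeyError input, which Pre_solution excludes
def dirIdx (p : String) : Int := PySem.Dict.getD pyDirections p 0

-- one iteration of A's for-loop over state (result, prevTime, currDir, currDis)
def stepA (st : List String × Int × String × Int) (p : String) :
    List String × Int × String × Int :=
  let (result, prevTime, currDir, currDis) := st
  if p == currDir then (result, prevTime, currDir, currDis + 1)
  else
    let turnDir := if dirIdx p - dirIdx currDir == 1 || dirIdx p - dirIdx currDir == -3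
                   then "right" else "left"
    let line := if currDis > 5 then
        "Time " ++ PySem.Int.toStr (prevTime + currDis - 5) ++ ": Go straight 500m and turn " ++ turnDir
      else
        "Time " ++ PySem.Int.toStr prevTime ++ ": Go straight " ++ PySem.Int.toStr (currDis * 100) ++ "m and turn " ++ turnDir
    (result ++ [line], prevTime + currDis, p, 1)

def solution (path : List String) : List String :=
  match path with
  | [] => []  -- Python A raises IndexError on path[0] here; excluded by Pre_solution
  | p0 :: _ => (path.foldl stepA ([], 0, p0, 0)).1

-- ===== PORT B =====
-- run-length encoding: outer while-loop as structural recursion, the inner while-loop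
-- (count how far the run of path[i] extends) as takeWhile/dropWhile
def runsB : List String → List (String × Int)
  | [] => []
  | d :: t =>
    (d, 1 + ((t.takeWhile (fun x => x == d)).length : Int)) ::
      runsB (t.dropWhile (fun x => x == d))
termination_by l => l.length
decreasing_by
  simpa using Nat.lt_succ_of_le (List.length_dropWhile_le _ _)

-- one iteration of B's for-loop over zip(runs, runs[1:]) with state (result, t)
def emitStep (st : List String × Int) (pr : (String × Int) × (String × Int)) :
    List String × Int :=
  let (result, t) := st
  let ((pd, pl), (cd, _cl)) := pr
  let diff := dirIdx cd - dirIdx pd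
  let turn := if diff == 1 || diff == -3 then "right" else "left"
  let line := if pl > 5 then
      "Time " ++ PySem.Int.toStr (t + pl - 5) ++ ": Go straight 500m and turn " ++ turn
    else
      "Time " ++ PySem.Int.toStr t ++ ": Go straight " ++ PySem.Int.toStr (pl * 100) ++ "m and turn " ++ turn
  (result ++ [line], t + pl)

def solution_alt (path : List String) : List String :=
  let runs := runsB path
  ((runs.zip runs.tail).foldl emitStep ([], 0)).1

-- ===== PRECONDITION & SPEC =====
-- Pre_ excludes exactly the inputs on which Python A raises: the empty path (IndexError on
-- path[0]) and paths where some element differing from its predecessor makes A look up a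
-- string outside the 'directions' dict (KeyError).
def Pre_solution (path : List String) : Prop :=
  path ≠ [] ∧
  ∀ pr ∈ path.zip path.tail,
    pr.1 ≠ pr.2 → pr.1 ∈ ["E", "S", "W", "N"] ∧ pr.2 ∈ ["E", "S", "W", "N"]
instance (path : List String) : Decidable (Pre_solution path) := by
  unfold Pre_solution; infer_instance

def pvWitness_solution : List String := ["E", "E", "S", "W", "W", "N"]

def Spec_solution (path : List String) (out : List String) : Prop := out = solution_alt path
instance (path : List String) (out : List String) : Decidable (Spec_solution path out) := by
  unfold Spec_solution; infer_instance

-- ===== CLAIM (what is proved, stated in full; the proofs are below) =====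
def Claim_equal_solution : Prop :=
  ∀ (path : List String), Dom_solution path → Pre_solution path → Spec_solution path (solution path)

-- ===== LEMMAS AND PROOFS =====

-- proof-only helpers: prepend a run (c, k), merging with the head if same direction,
-- and the recursive form of B's pairwise emitter
def consRun (c : String) (k : Int) (rs : List (String × Int)) : List (String × Int) :=
  match rs with
  | (c', n) :: r => if c' == c then (c, k + n) :: r else (c, k) :: rs
  | [] => [(c, k)]

def emitR : Int → List (String × Int) → List String
  | _, [] => []
  | _, [_] => []
  | t, (pd, pl) :: (cd, cl) :: r =>
    let diff := dirIdx cd - dirIdx pd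
    let turn := if diff == 1 || diff == -3 then "right" else "left"
    let line := if pl > 5 then
        "Time " ++ PySem.Int.toStr (t + pl - 5) ++ ": Go straight 500m and turn " ++ turn
      else
        "Time " ++ PySem.Int.toStr t ++ ": Go straight " ++ PySem.Int.toStr (pl * 100) ++ "m and turn " ++ turn
    line :: emitR (t + pl) ((cd, cl) :: r)

-- B's zip-foldl emitter is the recursive emitter
theorem foldl_emitStep_aux (rs : List (String × Int)) :
    ∀ (a : String × Int) (res : List String) (t : Int),
      (((a :: rs).zip rs).foldl emitStep (res, t)).1 = res ++ emitR t (a :: rs) := by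
  induction rs with
  | nil => intro a res t; simp [emitR]
  | cons b r ih =>
    intro a res t
    obtain ⟨pd, pl⟩ := a
    obtain ⟨cd, cl⟩ := b
    simp only [List.zip_cons_cons, List.foldl_cons]
    rw [show emitStep (res, t) ((pd, pl), (cd, cl)) = (res ++ [_], t + pl) from rfl]
    rw [ih]
    simp [emitR, List.append_assoc]

theorem foldl_emitStep (rs : List (String × Int)) (res : List String) (t : Int) :
    ((rs.zip rs.tail).foldl emitStep (res, t)).1 = res ++ emitR t rs := by
  cases rs with
  | nil => simp [emitR]
  | cons a r => exact foldl_emitStep_aux r a res t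

-- B's run-length encoding consumes one element as a consRun step
theorem runsB_cons (d : String) (t : List String) :
    runsB (d :: t) = consRun d 1 (runsB t) := by
  cases t with
  | nil => simp [runsB, consRun]
  | cons e t' =>
    by_cases h : e = d
    · subst h
      rw [runsB.eq_def]
      conv_rhs => rw [runsB.eq_def]
      simp only [List.takeWhile, List.dropWhile, BEq.rfl]
      rw [runsB.eq_def]
      simp only [consRun, BEq.rfl, if_pos]
      congr 2
      push_cast [List.length_cons]
      ring
    · have h' : (e == d) = false := by simp [h]
      rw [runsB.eq_def]
      conv_rhs => rw [runsB.eq_def]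
      simp only [List.takeWhile, List.dropWhile, h']
      simp only [consRun]
      rw [if_neg (by simp [h])]
      conv_lhs => rw [runsB.eq_def]
      simp

theorem consRun_consRun (c : String) (k : Int) (rs : List (String × Int)) :
    consRun c k (consRun c 1 rs) = consRun c (k + 1) rs := by
  simp only [consRun]
  cases rs with
  | nil => simp
  | cons h r =>
    obtain ⟨c', n⟩ := h
    by_cases h : c' == c
    · simp [h]; ring_nf
    · simp [h, consRun]

theorem consRun_head (c : String) (k : Int) (rs : List (String × Int)) :
    ∃ n r, consRun c k rs = (c, n) :: r := by
  simp only [consRun]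
  cases rs with
  | nil => exact ⟨k, [], rfl⟩
  | cons h r =>
    obtain ⟨c', n⟩ := h
    by_cases h : c' == c <;> simp [h]

-- loop invariant: folding A's step from state (res, t, c, k) over the rest of the path
-- produces res followed by the emitter applied to (c, k) merged onto the runs of the rest
theorem foldl_stepA_eq (path : List String) :
    ∀ (res : List String) (t : Int) (c : String) (k : Int),
      (path.foldl stepA (res, t, c, k)).1 = res ++ emitR t (consRun c k (runsB path)) := by
  induction path with
  | nil => intro res t c k; simp [runsB, consRun, emitR]
  | cons p rest ih =>
    intro res t c k
    rw [List.foldl_cons, runsB_cons]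
    by_cases hpc : p = c
    · subst hpc
      have hstep : stepA (res, t, p, k) p = (res, t, p, k + 1) := by
        simp [stepA]
      rw [hstep, ih, consRun_consRun]
    · have hpc' : (p == c) = false := by simp [hpc]
      simp only [stepA, hpc', Bool.false_eq_true, if_false]
      rw [ih]
      obtain ⟨n, r, hr⟩ := consRun_head p 1 (runsB rest)
      rw [hr]
      have hck : consRun c k ((p, n) :: r) = (c, k) :: (p, n) :: r := by
        simp only [consRun]
        rw [if_neg (by simp; intro h; exact absurd h hpc)]
      rw [hck]
      simp only [emitR]
      simp [List.append_assoc]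

theorem solution_eq_alt (p0 : String) (rest : List String) :
    solution (p0 :: rest) = solution_alt (p0 :: rest) := by
  show (List.foldl stepA ([], 0, p0, 0) (p0 :: rest)).1 = _
  rw [List.foldl_cons]
  have hstep : stepA ([], 0, p0, 0) p0 = ([], 0, p0, 1) := by simp [stepA]
  rw [hstep, foldl_stepA_eq]
  simp only [solution_alt]
  rw [foldl_emitStep, runsB_cons]

-- ===== VERDICT (by name: the statement is the Claim_ definition above) =====
theorem solution_spec : Claim_equal_solution := by
  intro path _ hpre
  unfold Spec_solution
  cases path with
  | nil => exact absurd rfl hpre.1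
  | cons p0 rest => exact solution_eq_alt p0 rest
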